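-- pv_equiv track=rewrite | github.com/pawlowiczf/ASD-2022-2023 | Grafy kwiecien 2023/cwiczenia 20.04.2023/4 oazy i miasta.py | createNewGraph
-- ===== SOURCE A (Python) =====
-- def DFS(G, cities, visited, visitedCities, v):
--     visited[v] = True
--
--     for neighbour in G[v]:
--
--         if cities[neighbour]:
--             visitedCities.append(neighbour)
--             visited[neighbour] = True
--
--         elif visited[neighbour] == False:
--             DFS(G, cities, visited, visitedCities, neighbour)
--
-- def createNewGraph(G, cities):
--
--     n = len(G)
--     visited = [ False for _ in range(n) ]
--     newG = [ [] for _ in range(n) ]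
--     visitedCities = []
--
--
--     for v in range(n):
--
--         if visited[v] == False and cities[v] == False:
--             DFS(G, cities, visited, visitedCities, v)
--
--             newG[v] = visitedCities
--             for k in visitedCities:
--                 newG[k].append(v)
--
--             visitedCities = []
--         #
--     #end for
--     return newG
-- ===== SOURCE B (Python) =====
-- def createNewGraph(G, cities):
--     n = len(G)
--     visited = [False] * n
--     newG = [[] for _ in range(n)]
--
--     for v in range(n):
--         if not visited[v] and not cities[v]:
--             visited[v] = True
--             visitedCities = []
--             stack = [iter(G[v])]          # iterative DFS: stack of neighbour iterators
--             while stack: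
--                 u = next(stack[-1], None)
--                 if u is None:
--                     stack.pop()
--                 elif cities[u]:
--                     visitedCities.append(u)
--                     visited[u] = True
--                 elif not visited[u]:
--                     visited[u] = True
--                     stack.append(iter(G[u]))
--
--             newG[v] = visitedCities
--             for k in visitedCities:
--                 newG[k].append(v)
--
--     return newG
-- ===== Notes on version B (the rewrite author's own statement) =====
-- stated objective: alternative
-- what changed: The recursive DFS helper is replaced by an iterative DFS driven by an explicit stack of neighbour iterators (resumed mid-scan), preserving A's exact preorder and unguarded duplicate city appends; the outer per-root assembly is unchanged.
-- outside the precondition, e.g. on createNewGraph([[-1]], [False, False]): A returns [[]], B returns [[]]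
import Mathlib
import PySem

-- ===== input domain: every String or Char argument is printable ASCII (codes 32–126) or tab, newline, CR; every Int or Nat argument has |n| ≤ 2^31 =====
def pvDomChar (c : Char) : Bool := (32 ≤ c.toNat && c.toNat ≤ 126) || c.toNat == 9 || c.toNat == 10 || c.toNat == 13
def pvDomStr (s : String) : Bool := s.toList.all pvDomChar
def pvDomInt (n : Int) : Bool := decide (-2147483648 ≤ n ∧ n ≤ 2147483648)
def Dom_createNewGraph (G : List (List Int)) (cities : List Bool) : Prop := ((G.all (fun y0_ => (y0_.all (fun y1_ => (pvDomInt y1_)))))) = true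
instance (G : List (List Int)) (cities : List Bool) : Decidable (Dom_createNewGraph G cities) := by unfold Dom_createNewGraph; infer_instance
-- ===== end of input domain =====

-- B replaces A's recursive DFS by an iterative DFS over an explicit stack of neighbour
-- iterators (same preorder, same duplicate city appends); equivalence of return values.

-- shared primitive-level helpers (Python list-index semantics)
def pvMark (vis : List Bool) (i : Int) : List Bool := PySem.List.pySetD vis i true
def pvNbrs (G : List (List Int)) (v : Int) : List Int := PySem.List.pyGetD G v []
def pvAppendAt (g : List (List Int)) (k : Int) (v : Int) : List (List Int) :=
  PySem.List.pySetD g k (PySem.List.pyGetD g k [] ++ [v])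
def pvCnt (vis : List Bool) : Nat := vis.count false

-- count lemmas cited by the termination proofs of both ports
theorem pvCnt_set_le (xs : List Bool) (j : Nat) : pvCnt (xs.set j true) ≤ pvCnt xs := by
  induction xs generalizing j with
  | nil => simp [pvCnt]
  | cons x xs ih =>
    cases j with
    | zero => cases x <;> simp [pvCnt] at *
    | succ j =>
      have := ih j
      cases x <;> simp [pvCnt] at * <;> omega

theorem pvCnt_set_lt (xs : List Bool) (j : Nat) (hj : xs[j]? = some false) :
    pvCnt (xs.set j true) < pvCnt xs := by
  induction xs generalizing j with
  | nil => simp at hj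
  | cons x xs ih =>
    cases j with
    | zero =>
      simp at hj; subst hj
      simp [pvCnt]
    | succ j =>
      simp at hj
      have := ih j hj
      cases x <;> simp [pvCnt] at * <;> omega

theorem pvCnt_mark_le (vis : List Bool) (i : Int) : pvCnt (pvMark vis i) ≤ pvCnt vis := by
  unfold pvMark PySem.List.pySetD PySem.List.pySet?
  cases h : PySem.List.pyIdx? vis.length i with
  | none => simp
  | some j => simpa using pvCnt_set_le vis j

theorem pvCnt_mark_lt (vis : List Bool) (i : Int)
    (h : PySem.List.pyGetD vis i true = false) : pvCnt (pvMark vis i) < pvCnt vis := by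
  unfold PySem.List.pyGetD PySem.List.pyGet? at h
  unfold pvMark PySem.List.pySetD PySem.List.pySet?
  cases hk : PySem.List.pyIdx? vis.length i with
  | none => simp [hk] at h
  | some j =>
    simp [hk] at h ⊢
    cases hg : vis[j]? with
    | none => simp [hg] at h
    | some b =>
      simp [hg] at h; subst h
      exact pvCnt_set_lt vis j hg

theorem pvNbrs_len_le (G : List (List Int)) (v : Int) :
    (pvNbrs G v).length ≤ (G.map List.length).sum := by
  unfold pvNbrs PySem.List.pyGetD
  cases h : PySem.List.pyGet? G v with
  | none => simp
  | some ns =>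
    have hm := PySem.List.mem_of_pyGet?_eq_some G h
    have : ns.length ∈ G.map List.length := List.mem_map_of_mem hm
    simpa using List.le_sum_of_mem this

-- ===== PORT A =====
-- A's recursive DFS: dfsA ns vis vc processes the remaining neighbour list ns of the
-- vertex currently being expanded (DFS(v) = dfsA G[v] (mark v) vc); the subtype result
-- carries the visited-count bound needed for termination only.
def dfsA (G : List (List Int)) (cities : List Bool) :
    (ns : List Int) → (vis : List Bool) → (vc : List Int) →
    {p : List Bool × List Int // pvCnt p.1 ≤ pvCnt vis}
  | [], vis, vc => ⟨(vis, vc), le_rfl⟩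
  | h :: t, vis, vc =>
    if PySem.List.pyGetD cities h false = true then
      -- city neighbour: append (no visited guard, duplicates possible), mark visited
      let r := dfsA G cities t (pvMark vis h) (vc ++ [h])
      ⟨r.1, le_trans r.2 (pvCnt_mark_le vis h)⟩
    else if hu : PySem.List.pyGetD vis h true = false then
      -- unvisited non-city: recursive DFS entry (marks h, scans G[h]), then resume t
      let s := dfsA G cities (pvNbrs G h) (pvMark vis h) vc
      let r := dfsA G cities t s.1.1 s.1.2
      ⟨r.1, le_trans r.2 (le_trans s.2 (le_of_lt (pvCnt_mark_lt vis h hu)))⟩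
    else
      dfsA G cities t vis vc
termination_by ns vis _ => (pvCnt vis, ns.length)
decreasing_by
  · rcases lt_or_eq_of_le (pvCnt_mark_le vis h) with h1 | h1
    · exact Prod.Lex.left _ _ h1
    · rw [h1]; exact Prod.Lex.right _ (by simp)
  · exact Prod.Lex.left _ _ (pvCnt_mark_lt vis h hu)
  · exact Prod.Lex.left _ _ (lt_of_le_of_lt s.2 (pvCnt_mark_lt vis h hu))
  · exact Prod.Lex.right _ (by simp)

def createNewGraph (G : List (List Int)) (cities : List Bool) : List (List Int) :=
  let n := G.length
  let r := (PySem.List.pyRange 0 (n : Int) 1).foldl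
    (fun (s : List Bool × List (List Int)) v =>
      if PySem.List.pyGetD s.1 v true = false ∧ PySem.List.pyGetD cities v true = false then
        let d := dfsA G cities (pvNbrs G v) (pvMark s.1 v) []   -- DFS(…, v)
        let g1 := PySem.List.pySetD s.2 v d.1.2                 -- newG[v] = visitedCities
        let g2 := d.1.2.foldl (fun g k => pvAppendAt g k v) g1  -- newG[k].append(v)
        (d.1.1, g2)
      else s)
    (List.replicate n false, List.replicate n ([] : List Int))
  r.2

-- ===== PORT B =====
-- B's iterative DFS: stack of neighbour iterators (each frame = the not-yet-consumed
-- suffix of some G[u]); popping an empty frame = exhausted iterator.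
def loopB (G : List (List Int)) (cities : List Bool) :
    (st : List (List Int)) → (vis : List Bool) → (vc : List Int) → List Bool × List Int
  | [], vis, vc => (vis, vc)
  | [] :: rest, vis, vc => loopB G cities rest vis vc               -- iterator exhausted: pop
  | (u :: t) :: rest, vis, vc =>
    if PySem.List.pyGetD cities u false = true then
      loopB G cities (t :: rest) (pvMark vis u) (vc ++ [u])
    else if PySem.List.pyGetD vis u true = false then
      loopB G cities (pvNbrs G u :: t :: rest) (pvMark vis u) vc    -- push iter(G[u])
    else
      loopB G cities (t :: rest) vis vc
termination_by st vis _ =>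
  pvCnt vis * ((G.map List.length).sum + 2) + st.foldr (fun ns a => ns.length + 1 + a) 0
decreasing_by
  · simp only [List.foldr]; omega
  · have := Nat.mul_le_mul_right ((G.map List.length).sum + 2) (pvCnt_mark_le vis u)
    simp only [List.foldr, List.length_cons]; omega
  · have h2 := pvNbrs_len_le G u
    have h3 : pvCnt (pvMark vis u) + 1 ≤ pvCnt vis := pvCnt_mark_lt vis u (by assumption)
    have h4 : pvCnt (pvMark vis u) * ((G.map List.length).sum + 2) + (G.map List.length).sum + 2
        ≤ pvCnt vis * ((G.map List.length).sum + 2) := by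
      have := Nat.mul_le_mul_right ((G.map List.length).sum + 2) h3
      calc pvCnt (pvMark vis u) * ((G.map List.length).sum + 2) + (G.map List.length).sum + 2
          = (pvCnt (pvMark vis u) + 1) * ((G.map List.length).sum + 2) := by ring
        _ ≤ _ := this
    simp only [List.foldr, List.length_cons]; omega
  · simp only [List.foldr, List.length_cons]; omega

def createNewGraph_alt (G : List (List Int)) (cities : List Bool) : List (List Int) :=
  let n := G.length
  let r := (PySem.List.pyRange 0 (n : Int) 1).foldl
    (fun (s : List Bool × List (List Int)) v =>
      if !(PySem.List.pyGetD s.1 v true) && !(PySem.List.pyGetD cities v true) then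
        let d := loopB G cities [pvNbrs G v] (pvMark s.1 v) []     -- stack = [iter(G[v])]
        let g1 := PySem.List.pySetD s.2 v d.2
        let g2 := d.2.foldl (fun g k => pvAppendAt g k v) g1
        (d.1, g2)
      else s)
    (List.replicate n false, List.replicate n ([] : List Int))
  r.2

-- ===== PRECONDITION & SPEC =====
-- Pre_ excludes inputs where Python A raises IndexError (fewer city flags than
-- vertices, or a neighbour outside [-n, n) in a row whose city flag is false — city
-- rows are never scanned) or can diverge (with extra city flags a negative neighbour
-- can make newG[k] alias the visitedCities list being iterated, so negative
-- neighbours in scanned rows are excluded unless len(cities) = len(G)).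
def Pre_createNewGraph (G : List (List Int)) (cities : List Bool) : Prop :=
  G.length ≤ cities.length ∧
  (∀ j < G.length, cities.getD j true = false →
    ∀ d ∈ G.getD j [], -(G.length : Int) ≤ d ∧ d < (G.length : Int)) ∧
  (cities.length = G.length ∨
    ∀ j < G.length, cities.getD j true = false → ∀ d ∈ G.getD j [], 0 ≤ d)
instance (G : List (List Int)) (cities : List Bool) : Decidable (Pre_createNewGraph G cities) := by
  unfold Pre_createNewGraph; infer_instance

def pvWitness_createNewGraph : List (List Int) × List Bool := ([[1], [0]], [false, true])

def Spec_createNewGraph (G : List (List Int)) (cities : List Bool) (out : List (List Int)) : Prop := out = createNewGraph_alt G cities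
instance (G : List (List Int)) (cities : List Bool) (out : List (List Int)) : Decidable (Spec_createNewGraph G cities out) := by unfold Spec_createNewGraph; infer_instance

-- ===== CLAIM (what is proved, stated in full; the proofs are below) =====
def Claim_equal_createNewGraph : Prop := ∀ (G : List (List Int)) (cities : List Bool), Dom_createNewGraph G cities → Pre_createNewGraph G cities → Spec_createNewGraph G cities (createNewGraph G cities)

-- ===== LEMMAS AND PROOFS =====

-- the stack loop run on a frame ns on top of st equals A's recursive scan of ns,
-- continued on st
theorem loopB_cons (G : List (List Int)) (cities : List Bool)
    (ns : List Int) (vis : List Bool) (vc : List Int) :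
    ∀ st, loopB G cities (ns :: st) vis vc =
      loopB G cities st (dfsA G cities ns vis vc).1.1 (dfsA G cities ns vis vc).1.2 := by
  induction ns, vis, vc using dfsA.induct G cities with
  | case1 vis vc => intro st; rw [loopB, dfsA]
  | case2 h t vis vc hc ih =>
    intro st
    rw [loopB, dfsA, if_pos hc, if_pos hc]
    exact ih st
  | case3 h t vis vc hc hu s ihs r ihr =>
    intro st
    rw [loopB, dfsA, if_neg hc, if_neg hc, if_pos hu, dif_pos hu]
    rw [ihs (t :: st)]
    exact ihr st
  | case4 h t vis vc hc hu ih =>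
    intro st
    rw [loopB, dfsA, if_neg hc, if_neg hc, if_neg hu, dif_neg hu]
    exact ih st

-- the per-root step functions of the two outer loops agree, hence so do the folds
theorem foldl_step_eq (G : List (List Int)) (cities : List Bool) :
    ∀ (l : List Int) (s : List Bool × List (List Int)),
    l.foldl (fun (s : List Bool × List (List Int)) v =>
      if PySem.List.pyGetD s.1 v true = false ∧ PySem.List.pyGetD cities v true = false then
        let d := dfsA G cities (pvNbrs G v) (pvMark s.1 v) []
        let g1 := PySem.List.pySetD s.2 v d.1.2
        let g2 := d.1.2.foldl (fun g k => pvAppendAt g k v) g1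
        (d.1.1, g2)
      else s) s =
    l.foldl (fun (s : List Bool × List (List Int)) v =>
      if !(PySem.List.pyGetD s.1 v true) && !(PySem.List.pyGetD cities v true) then
        let d := loopB G cities [pvNbrs G v] (pvMark s.1 v) []
        let g1 := PySem.List.pySetD s.2 v d.2
        let g2 := d.2.foldl (fun g k => pvAppendAt g k v) g1
        (d.1, g2)
      else s) s := by
  intro l
  induction l with
  | nil => intro s; rfl
  | cons v l ih =>
    intro s
    simp only [List.foldl_cons]
    rw [show (if PySem.List.pyGetD s.1 v true = false ∧ PySem.List.pyGetD cities v true = false then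
        let d := dfsA G cities (pvNbrs G v) (pvMark s.1 v) []
        let g1 := PySem.List.pySetD s.2 v d.1.2
        let g2 := d.1.2.foldl (fun g k => pvAppendAt g k v) g1
        (d.1.1, g2)
      else s) =
      (if !(PySem.List.pyGetD s.1 v true) && !(PySem.List.pyGetD cities v true) then
        let d := loopB G cities [pvNbrs G v] (pvMark s.1 v) []
        let g1 := PySem.List.pySetD s.2 v d.2
        let g2 := d.2.foldl (fun g k => pvAppendAt g k v) g1
        (d.1, g2)
      else s) from ?_]
    · exact ih _
    · by_cases hp : PySem.List.pyGetD s.1 v true = false <;>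
        by_cases hq : PySem.List.pyGetD cities v true = false
      · rw [if_pos ⟨hp, hq⟩, if_pos (by simp [hp, hq])]
        rw [loopB_cons G cities (pvNbrs G v) (pvMark s.1 v) [] [], loopB]
      · rw [if_neg (by tauto), if_neg (by simp [hq])]
      · rw [if_neg (by tauto), if_neg (by simp [hp])]
      · rw [if_neg (by tauto), if_neg (by simp [hp])]

-- ===== VERDICT (by name: the statement is the Claim_ definition above) =====
theorem createNewGraph_spec : Claim_equal_createNewGraph := by
  intro G cities _ _
  show createNewGraph G cities = createNewGraph_alt G cities
  exact congrArg Prod.snd (foldl_step_eq G cities (PySem.List.pyRange 0 (G.length : Int) 1)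
    (List.replicate G.length false, List.replicate G.length []))
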